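-- pv_equiv track=rewrite | github.com/Arkay92/PenroseEncrypt | main.py | mul_poly_simple
-- ===== SOURCE A (Python) =====
-- def mul_poly_simple(a, b, f, q):
--     tmp = [0] * (len(a) * 2 - 1)
--     for i in range(len(a)):
--         for j in range(len(b)):
--             tmp[i + j] += a[i] * b[j]
--     degree_f = len(f) - 1
--     for i in range(degree_f, len(tmp)):
--         tmp[i - degree_f] -= tmp[i]
--         tmp[i] = 0
--     tmp = list(map(lambda x: x % q, tmp))
--     return tmp[:degree_f]
-- ===== SOURCE B (Python) =====
-- def mul_poly_simple(a, b, f, q):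
--     n = max(0, 2 * len(a) - 1)
--     d = len(f) - 1
--
--     def conv(k):
--         lo = max(0, k - len(b) + 1)
--         hi = min(k + 1, len(a))
--         return sum(a[i] * b[k - i] for i in range(lo, hi))
--
--     return [(conv(k) - (conv(k + d) if k + d < n else 0)) % q
--             for k in range(min(d, n))]
-- ===== Notes on version B (the rewrite author's own statement) =====
-- stated objective: alternative
-- what changed: B computes each output coefficient directly as a closed-form windowed dot product conv(k) - conv(k+d) (when k+d is in range) mod q, instead of A's mutable accumulator array filled by nested index loops and then reduced by an in-place sequential sweep.
import Mathlib
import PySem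

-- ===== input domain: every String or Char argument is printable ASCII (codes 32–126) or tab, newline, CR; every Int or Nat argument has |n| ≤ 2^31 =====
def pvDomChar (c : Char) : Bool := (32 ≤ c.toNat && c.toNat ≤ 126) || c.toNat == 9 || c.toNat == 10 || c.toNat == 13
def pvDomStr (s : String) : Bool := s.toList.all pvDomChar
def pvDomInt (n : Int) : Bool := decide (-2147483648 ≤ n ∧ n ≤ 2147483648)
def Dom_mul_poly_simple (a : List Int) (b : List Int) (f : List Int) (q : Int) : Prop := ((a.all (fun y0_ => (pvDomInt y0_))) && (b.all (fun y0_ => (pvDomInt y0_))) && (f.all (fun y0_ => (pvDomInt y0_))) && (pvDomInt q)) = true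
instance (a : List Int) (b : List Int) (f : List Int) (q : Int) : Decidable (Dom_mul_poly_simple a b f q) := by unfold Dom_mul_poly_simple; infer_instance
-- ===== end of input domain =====

-- B replaces A's in-place accumulator array and sequential reduction sweep by a per-coefficient
-- closed form (objective: alternative/simpler; same asymptotic cost).

-- ===== PORT A =====
def mul_poly_simple (a : List Int) (b : List Int) (f : List Int) (q : Int) : List Int :=
  -- tmp = [0] * (len(a) * 2 - 1)   (Python's negative repeat count gives []; Nat subtraction matches)
  let tmp0 : List Int := List.replicate (a.length * 2 - 1) 0
  -- for i in range(len(a)): for j in range(len(b)): tmp[i + j] += a[i] * b[j]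
  let tmp1 := (PySem.List.pyRange 0 (PySem.List.len a)).foldl (fun t i =>
      (PySem.List.pyRange 0 (PySem.List.len b)).foldl (fun t j =>
        PySem.List.pySetD t (i + j)
          (PySem.List.pyGetD t (i + j) 0 + PySem.List.pyGetD a i 0 * PySem.List.pyGetD b j 0)) t) tmp0
  -- degree_f = len(f) - 1
  let df : Int := PySem.List.len f - 1
  -- for i in range(degree_f, len(tmp)): tmp[i - degree_f] -= tmp[i]; tmp[i] = 0
  let tmp2 := (PySem.List.pyRange df (PySem.List.len tmp1)).foldl (fun t i =>
      let t' := PySem.List.pySetD t (i - df) (PySem.List.pyGetD t (i - df) 0 - PySem.List.pyGetD t i 0)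
      PySem.List.pySetD t' i 0) tmp1
  -- tmp = list(map(lambda x: x % q, tmp)); return tmp[:degree_f]
  let tmp3 := tmp2.map (fun x => PySem.Int.mod x q)
  PySem.List.slice tmp3 none (some df)

-- ===== PORT B =====
-- conv(k) of Source B: sum(a[i] * b[k - i] for i in range(max(0, k - len(b) + 1), min(k + 1, len(a))))
def pvConvB (a : List Int) (b : List Int) (k : Int) : Int :=
  ((PySem.List.pyRange (max 0 (k - PySem.List.len b + 1)) (min (k + 1) (PySem.List.len a))).map
    (fun i => PySem.List.pyGetD a i 0 * PySem.List.pyGetD b (k - i) 0)).sum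

def mul_poly_simple_alt (a : List Int) (b : List Int) (f : List Int) (q : Int) : List Int :=
  let n : Int := max 0 (2 * PySem.List.len a - 1)
  let df : Int := PySem.List.len f - 1
  (PySem.List.pyRange 0 (min df n)).map (fun k =>
    PySem.Int.mod (pvConvB a b k - (if k + df < n then pvConvB a b (k + df) else 0)) q)

-- ===== PRECONDITION & SPEC =====
-- Pre_ excludes exactly the inputs where A raises: q = 0 (ZeroDivisionError in x % q), f = []
-- (the reduction loop indexes tmp[i+1] past the end, or tmp[-1] of the empty list: IndexError),
-- and len(b) > len(a) with a nonempty (tmp[i+j] out of range: IndexError).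
def Pre_mul_poly_simple (a : List Int) (b : List Int) (f : List Int) (q : Int) : Prop :=
  q ≠ 0 ∧ f ≠ [] ∧ (a = [] ∨ b.length ≤ a.length)
instance (a : List Int) (b : List Int) (f : List Int) (q : Int) : Decidable (Pre_mul_poly_simple a b f q) := by unfold Pre_mul_poly_simple; infer_instance

def pvWitness_mul_poly_simple : List Int × List Int × List Int × Int := ([1, 2], [1, 1], [1, 0, 1], 7)

def Spec_mul_poly_simple (a : List Int) (b : List Int) (f : List Int) (q : Int) (out : List Int) : Prop := out = mul_poly_simple_alt a b f q
instance (a : List Int) (b : List Int) (f : List Int) (q : Int) (out : List Int) : Decidable (Spec_mul_poly_simple a b f q out) := by unfold Spec_mul_poly_simple; infer_instance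

-- ===== CLAIM (what is proved, stated in full; the proofs are below) =====
def Claim_equal_mul_poly_simple : Prop := ∀ (a : List Int) (b : List Int) (f : List Int) (q : Int), Dom_mul_poly_simple a b f q → Pre_mul_poly_simple a b f q → Spec_mul_poly_simple a b f q (mul_poly_simple a b f q)

-- ===== LEMMAS AND PROOFS =====

-- contribution of outer-loop iteration i to coefficient k of the convolution
def pvCAdd (a : List Int) (b : List Int) (i k : Nat) : Int :=
  if i ≤ k ∧ k - i < b.length then a.getD i 0 * b.getD (k - i) 0 else 0

-- the full convolution coefficient
def pvConv (a : List Int) (b : List Int) (k : Nat) : Int :=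
  ∑ i ∈ Finset.range a.length, pvCAdd a b i k

theorem pv_getD_set (t : List Int) (k m : Nat) (v : Int) (hk : k < t.length) :
    (t.set k v).getD m 0 = if k = m then v else t.getD m 0 := by
  rcases eq_or_ne k m with rfl | h
  · simp [List.getD, hk]
  · simp [List.getD, List.getElem?_set_ne h, h]

theorem pv_inner (a b : List Int) (i : Nat) :
    ∀ (m : Nat) (t : List Int), (∀ j, j < m → i + j < t.length) →
      ((List.range m).foldl
          (fun t j => t.set (i + j) (t.getD (i + j) 0 + a.getD i 0 * b.getD j 0)) t).length
        = t.length ∧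
      ∀ k, ((List.range m).foldl
          (fun t j => t.set (i + j) (t.getD (i + j) 0 + a.getD i 0 * b.getD j 0)) t).getD k 0
        = t.getD k 0 + ∑ j ∈ Finset.range m, (if i + j = k then a.getD i 0 * b.getD j 0 else 0) := by
  intro m
  induction m with
  | zero => intro t h; simp
  | succ m ih =>
    intro t h
    have hm := ih t (fun j hj => h j (by omega))
    rw [List.range_succ, List.foldl_append]
    simp only [List.foldl_cons, List.foldl_nil]
    set R := (List.range m).foldl
      (fun t j => t.set (i + j) (t.getD (i + j) 0 + a.getD i 0 * b.getD j 0)) t with hR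
    have hlen : R.length = t.length := hm.1
    have him : i + m < R.length := by rw [hlen]; exact h m (by omega)
    constructor
    · simp [hlen]
    · intro k
      rw [pv_getD_set R (i + m) k _ him, Finset.sum_range_succ]
      rcases eq_or_ne (i + m) k with rfl | hne
      · simp only [hm.2 (i + m)]
        have hz : ∑ j ∈ Finset.range m,
            (if i + j = i + m then a.getD i 0 * b.getD j 0 else 0) = 0 := by
          apply Finset.sum_eq_zero
          intro j hj
          rw [if_neg (by simp at hj; omega)]
        rw [hz]; simp
      · rw [if_neg hne, hm.2 k, if_neg hne, add_zero]

theorem pv_cAdd_eq_sum (a b : List Int) (i k : Nat) :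
    (∑ j ∈ Finset.range b.length, (if i + j = k then a.getD i 0 * b.getD j 0 else 0))
      = pvCAdd a b i k := by
  unfold pvCAdd
  by_cases hik : i ≤ k ∧ k - i < b.length
  · rw [if_pos hik]
    have hcg : ∀ j ∈ Finset.range b.length,
        (if i + j = k then a.getD i 0 * b.getD j 0 else 0)
          = (if j = k - i then a.getD i 0 * b.getD j 0 else 0) := by
      intro j hj
      by_cases hc : i + j = k
      · rw [if_pos hc, if_pos (by omega)]
      · rw [if_neg hc, if_neg (by omega)]
    rw [Finset.sum_congr rfl hcg]
    rw [Finset.sum_ite_eq' (Finset.range b.length) (k - i) (fun j => a.getD i 0 * b.getD j 0)]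
    rw [if_pos (Finset.mem_range.mpr hik.2)]
  · rw [if_neg hik]
    apply Finset.sum_eq_zero
    intro j hj
    simp only [Finset.mem_range] at hj
    rw [if_neg (by omega)]

theorem pv_outer (a b : List Int) (N : Nat) :
    ∀ (m : Nat) (t : List Int), t.length = N → (∀ i, i < m → b.length = 0 ∨ i + b.length ≤ N) →
      ((List.range m).foldl
          (fun t i => (List.range b.length).foldl
            (fun t j => t.set (i + j) (t.getD (i + j) 0 + a.getD i 0 * b.getD j 0)) t) t).length
        = N ∧
      ∀ k, ((List.range m).foldl
          (fun t i => (List.range b.length).foldl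
            (fun t j => t.set (i + j) (t.getD (i + j) 0 + a.getD i 0 * b.getD j 0)) t) t).getD k 0
        = t.getD k 0 + ∑ i ∈ Finset.range m, pvCAdd a b i k := by
  intro m
  induction m with
  | zero => intro t ht h; simp [ht]
  | succ m ih =>
    intro t ht h
    have hm := ih t ht (fun i hi => h i (by omega))
    rw [List.range_succ, List.foldl_append]
    simp only [List.foldl_cons, List.foldl_nil]
    set R := (List.range m).foldl
      (fun t i => (List.range b.length).foldl
        (fun t j => t.set (i + j) (t.getD (i + j) 0 + a.getD i 0 * b.getD j 0)) t) t with hR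
    have hlen : R.length = N := hm.1
    have hrange : ∀ j, j < b.length → m + j < R.length := by
      intro j hj
      rcases h m (by omega) with h0 | h0
      · omega
      · omega
    have hin := pv_inner a b m b.length R hrange
    constructor
    · rw [hin.1, hlen]
    · intro k
      rw [hin.2 k, hm.2 k, pv_cAdd_eq_sum a b m k, Finset.sum_range_succ]
      ring

-- the reduction sweep: after processing k = 0, …, m-1 (i.e. i = dN, …, dN+m-1 in A's indexing)
theorem pv_red (dN : Nat) :
    ∀ (m : Nat) (t : List Int), dN + m ≤ t.length →
      (((List.range m).foldl
          (fun t k => (t.set k (t.getD k 0 - t.getD (dN + k) 0)).set (dN + k) 0) t).length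
        = t.length ∧
      (∀ j, j < dN → j < m →
        ((List.range m).foldl
          (fun t k => (t.set k (t.getD k 0 - t.getD (dN + k) 0)).set (dN + k) 0) t).getD j 0
          = t.getD j 0 - t.getD (j + dN) 0) ∧
      (∀ j, j < dN → m ≤ j →
        ((List.range m).foldl
          (fun t k => (t.set k (t.getD k 0 - t.getD (dN + k) 0)).set (dN + k) 0) t).getD j 0
          = t.getD j 0) ∧
      (∀ j, dN + m ≤ j →
        ((List.range m).foldl
          (fun t k => (t.set k (t.getD k 0 - t.getD (dN + k) 0)).set (dN + k) 0) t).getD j 0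
          = t.getD j 0) ∧
      (∀ j, dN ≤ j → m ≤ j → j < dN + m →
        ((List.range m).foldl
          (fun t k => (t.set k (t.getD k 0 - t.getD (dN + k) 0)).set (dN + k) 0) t).getD j 0
          = 0)) := by
  intro m
  induction m with
  | zero =>
    intro t ht
    refine ⟨by simp, by omega, by simp, by simp, by omega⟩
  | succ m ih =>
    intro t ht
    have hm := ih t (by omega)
    rw [List.range_succ, List.foldl_append]
    simp only [List.foldl_cons, List.foldl_nil]
    set R := (List.range m).foldl
      (fun t k => (t.set k (t.getD k 0 - t.getD (dN + k) 0)).set (dN + k) 0) t with hR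
    obtain ⟨c1, c2, c3, c4, c5⟩ := hm
    have hmlt : m < R.length := by omega
    have hdmlt : dN + m < R.length := by omega
    have hdmlt' : dN + m < (R.set m (R.getD m 0 - R.getD (dN + m) 0)).length := by
      rw [List.length_set]; exact hdmlt
    have hget : ∀ j, ((R.set m (R.getD m 0 - R.getD (dN + m) 0)).set (dN + m) 0).getD j 0
        = if dN + m = j then 0
          else if m = j then R.getD m 0 - R.getD (dN + m) 0 else R.getD j 0 := by
      intro j
      rw [pv_getD_set _ _ _ _ hdmlt', pv_getD_set _ _ _ _ hmlt]
    have hlen : ((R.set m (R.getD m 0 - R.getD (dN + m) 0)).set (dN + m) 0).length = t.length := by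
      simp [c1]
    by_cases hd : dN = 0
    · subst hd
      refine ⟨hlen, by omega, by omega, ?_, by omega⟩
      intro j hj
      rw [hget j, if_neg (by omega), if_neg (by omega)]
      exact c4 j (by omega)
    · have vdm : R.getD (dN + m) 0 = t.getD (dN + m) 0 := c4 (dN + m) (by omega)
      have vm : R.getD m 0 = if m < dN then t.getD m 0 else 0 := by
        by_cases hmd : m < dN
        · rw [if_pos hmd]; exact c3 m hmd (by omega)
        · rw [if_neg hmd]; exact c5 m (by omega) (by omega) (by omega)
      refine ⟨hlen, ?_, ?_, ?_, ?_⟩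
      · intro j hj hjm
        rw [hget j, if_neg (by omega)]
        rcases eq_or_ne m j with rfl | hne
        · rw [if_pos rfl, vm, if_pos hj, vdm, Nat.add_comm dN m]
        · rw [if_neg hne]
          exact c2 j hj (by omega)
      · intro j hj hjm
        rw [hget j, if_neg (by omega), if_neg (by omega)]
        exact c3 j hj (by omega)
      · intro j hj
        rw [hget j, if_neg (by omega), if_neg (by omega)]
        exact c4 j (by omega)
      · intro j hj1 hj2 hj3
        rw [hget j]
        rcases eq_or_ne (dN + m) j with rfl | hne
        · rw [if_pos rfl]
        · rw [if_neg hne, if_neg (by omega)]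
          exact c5 j hj1 (by omega) (by omega)

theorem pv_sum_map_range (n : Nat) (f : Nat → Int) :
    ((List.range n).map f).sum = ∑ i ∈ Finset.range n, f i := rfl

theorem pv_convB_eq (a b : List Int) (k : Nat) : pvConvB a b (k : Int) = pvConv a b k := by
  unfold pvConvB
  set loN : Nat := k + 1 - b.length with hloN
  set hiN : Nat := min (k + 1) a.length with hhiN
  have hlo : max 0 ((k : Int) - PySem.List.len b + 1) = (loN : Int) := by
    simp [PySem.List.len_eq]; omega
  have hhi : min ((k : Int) + 1) (PySem.List.len a) = (hiN : Int) := by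
    simp [PySem.List.len_eq]; omega
  rw [hlo, hhi, PySem.List.pyRange_one]
  have htn : (((hiN : Int) - (loN : Int)).toNat) = hiN - loN := by omega
  rw [htn, List.map_map, pv_sum_map_range]
  have hterm : ∀ t ∈ Finset.range (hiN - loN),
      ((fun i => PySem.List.pyGetD a i 0 * PySem.List.pyGetD b ((k : Int) - i) 0) ∘
        fun (j : Nat) => (loN : Int) + (j : Int)) t
        = a.getD (loN + t) 0 * b.getD (k - (loN + t)) 0 := by
    intro t ht
    simp only [Finset.mem_range] at ht
    have h1 : (loN : Int) + (t : Int) = ((loN + t : Nat) : Int) := by push_cast; ring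
    have h2 : (k : Int) - ((loN + t : Nat) : Int) = ((k - (loN + t) : Nat) : Int) := by omega
    simp only [Function.comp, h1, h2, PySem.List.pyGetD_natCast]
  rw [Finset.sum_congr rfl hterm,
    ← Finset.sum_Ico_eq_sum_range (f := fun i => a.getD i 0 * b.getD (k - i) 0)]
  have hsub : Finset.Ico loN hiN ⊆ Finset.range a.length := by
    intro i hi
    simp only [Finset.mem_Ico] at hi
    simp only [Finset.mem_range]
    omega
  have hzero : ∀ i ∈ Finset.range a.length, i ∉ Finset.Ico loN hiN → pvCAdd a b i k = 0 := by
    intro i hi hni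
    simp only [Finset.mem_range] at hi
    simp only [Finset.mem_Ico, not_and, not_lt] at hni
    unfold pvCAdd
    rw [if_neg (by omega)]
  have hfit : ∀ i ∈ Finset.Ico loN hiN,
      a.getD i 0 * b.getD (k - i) 0 = pvCAdd a b i k := by
    intro i hi
    simp only [Finset.mem_Ico] at hi
    unfold pvCAdd
    rw [if_pos (by omega)]
  rw [Finset.sum_congr rfl hfit]
  unfold pvConv
  exact Finset.sum_subset hsub hzero

-- B's port, rewritten over Nat indices
theorem pv_portB_eq (a b f : List Int) (q : Int) (hf : f ≠ []) :
    mul_poly_simple_alt a b f q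
      = (List.range (min (f.length - 1) (a.length * 2 - 1))).map
          (fun j => PySem.Int.mod
            (pvConv a b j -
              (if j + (f.length - 1) < a.length * 2 - 1
                then pvConv a b (j + (f.length - 1)) else 0)) q) := by
  have hfl : f.length ≠ 0 := by
    simpa [List.length_eq_zero_iff] using hf
  unfold mul_poly_simple_alt
  have h1 : max 0 (2 * PySem.List.len a - 1) = ((a.length * 2 - 1 : Nat) : Int) := by
    simp [PySem.List.len_eq]; omega
  have h2 : PySem.List.len f - 1 = ((f.length - 1 : Nat) : Int) := by
    simp [PySem.List.len_eq]; omega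
  simp only [h1, h2]
  have h3 : min ((f.length - 1 : Nat) : Int) ((a.length * 2 - 1 : Nat) : Int)
      = ((min (f.length - 1) (a.length * 2 - 1) : Nat) : Int) := by omega
  rw [h3, PySem.List.pyRange_zero_nat, List.map_map]
  apply List.map_congr_left
  intro j hj
  simp only [List.mem_range] at hj
  have h4 : (j : Int) + ((f.length - 1 : Nat) : Int)
      = ((j + (f.length - 1) : Nat) : Int) := by push_cast; ring
  simp only [Function.comp, h4, pv_convB_eq, Nat.cast_lt]

-- reindexing the two Python loops over Int ranges as loops over Nat ranges
theorem pv_convfold_cast (a b : List Int) (T : List Int) :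
    (PySem.List.pyRange 0 (PySem.List.len a)).foldl
      (fun t i => (PySem.List.pyRange 0 (PySem.List.len b)).foldl
        (fun t j => PySem.List.pySetD t (i + j)
          (PySem.List.pyGetD t (i + j) 0 + PySem.List.pyGetD a i 0 * PySem.List.pyGetD b j 0)) t) T
    = (List.range a.length).foldl
        (fun t i => (List.range b.length).foldl
          (fun t j => t.set (i + j) (t.getD (i + j) 0 + a.getD i 0 * b.getD j 0)) t) T := by
  simp only [PySem.List.len_eq, PySem.List.pyRange_zero_nat, List.foldl_map]
  apply PySem.List.foldl_congr_mem
  intro t i hi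
  apply PySem.List.foldl_congr_mem
  intro t' j hj
  rw [show (i : Int) + (j : Int) = ((i + j : Nat) : Int) by push_cast; ring]
  rw [PySem.List.pySetD_natCast, PySem.List.pyGetD_natCast, PySem.List.pyGetD_natCast,
    PySem.List.pyGetD_natCast]

theorem pv_redfold_cast (dN n : Nat) (T : List Int) :
    (PySem.List.pyRange (dN : Int) (n : Int)).foldl
      (fun t i => PySem.List.pySetD
        (PySem.List.pySetD t (i - (dN : Int))
          (PySem.List.pyGetD t (i - (dN : Int)) 0 - PySem.List.pyGetD t i 0)) i 0) T
    = (List.range (n - dN)).foldl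
        (fun t k => (t.set k (t.getD k 0 - t.getD (dN + k) 0)).set (dN + k) 0) T := by
  rw [PySem.List.pyRange_one]
  rw [show (((n : Int) - (dN : Int)).toNat) = n - dN by omega]
  rw [List.foldl_map]
  apply PySem.List.foldl_congr_mem
  intro t k hk
  rw [show ((dN : Int) + (k : Int)) - (dN : Int) = ((k : Nat) : Int) by ring]
  rw [show (dN : Int) + (k : Int) = ((dN + k : Nat) : Int) by push_cast; ring]
  rw [PySem.List.pySetD_natCast, PySem.List.pySetD_natCast, PySem.List.pyGetD_natCast,
    PySem.List.pyGetD_natCast]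

-- A's port, rewritten to the same normal form
theorem pv_portA_eq (a b f : List Int) (q : Int) (hf : f ≠ [])
    (hab : a = [] ∨ b.length ≤ a.length) :
    mul_poly_simple a b f q
      = (List.range (min (f.length - 1) (a.length * 2 - 1))).map
          (fun j => PySem.Int.mod
            (pvConv a b j -
              (if j + (f.length - 1) < a.length * 2 - 1
                then pvConv a b (j + (f.length - 1)) else 0)) q) := by
  have hfl : f.length ≠ 0 := by simpa [List.length_eq_zero_iff] using hf
  have h2 : PySem.List.len f - 1 = ((f.length - 1 : Nat) : Int) := by
    simp [PySem.List.len_eq]; omega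
  unfold mul_poly_simple
  simp only [pv_convfold_cast, h2]
  set T1 := (List.range a.length).foldl
      (fun t i => (List.range b.length).foldl
        (fun t j => t.set (i + j) (t.getD (i + j) 0 + a.getD i 0 * b.getD j 0)) t)
      (List.replicate (a.length * 2 - 1) 0) with hT1
  obtain ⟨L1, G1⟩ := pv_outer a b (a.length * 2 - 1) a.length
      (List.replicate (a.length * 2 - 1) 0) (by simp)
      (by
        intro i hi
        rcases hab with rfl | hba
        · simp at hi
        · right; omega)
  have L1' : T1.length = a.length * 2 - 1 := by rw [hT1]; exact L1
  have G1' : ∀ k, T1.getD k 0 = pvConv a b k := by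
    intro k
    rw [hT1, G1 k]
    simp [List.getD, List.getElem?_replicate, pvConv]
    split <;> rfl
  rw [PySem.List.len_eq, L1', pv_redfold_cast]
  set T2 := (List.range (a.length * 2 - 1 - (f.length - 1))).foldl
      (fun t k => (t.set k (t.getD k 0 - t.getD (f.length - 1 + k) 0)).set (f.length - 1 + k) 0)
      T1 with hT2
  have hL2 : T2.length = a.length * 2 - 1 ∧
      (∀ j, j < f.length - 1 → T2.getD j 0
        = pvConv a b j -
            (if j + (f.length - 1) < a.length * 2 - 1
              then pvConv a b (j + (f.length - 1)) else 0)) := by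
    by_cases hdn : f.length - 1 ≤ a.length * 2 - 1
    · obtain ⟨c1, c2, c3, c4, c5⟩ := pv_red (f.length - 1)
        (a.length * 2 - 1 - (f.length - 1)) T1 (by omega)
      constructor
      · rw [hT2, c1, L1']
      · intro j hj
        by_cases hjm : j < a.length * 2 - 1 - (f.length - 1)
        · rw [hT2, c2 j hj hjm, G1' j, G1' (j + (f.length - 1)), if_pos (by omega)]
        · rw [hT2, c3 j hj (by omega), G1' j, if_neg (by omega)]
          ring
    · have hz : a.length * 2 - 1 - (f.length - 1) = 0 := by omega
      rw [hT2, hz]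
      simp only [List.range_zero, List.foldl_nil]
      refine ⟨L1', ?_⟩
      intro j hj
      rw [G1' j, if_neg (by omega)]
      ring
  rw [PySem.List.slice_to _ (Int.natCast_nonneg _), Int.toNat_natCast]
  apply List.ext_getElem
  · simp [hL2.1]
  · intro i h1 h2
    simp only [List.getElem_take, List.getElem_map, List.getElem_range]
    have hi : i < min (f.length - 1) (a.length * 2 - 1) := by
      simp [hL2.1] at h1
      omega
    have hgd : T2.getD i 0 = T2[i] :=
      List.getD_eq_getElem T2 0 (by omega)
    rw [← hgd, hL2.2 i (by omega)]

-- ===== VERDICT (by name: the statement is the Claim_ definition above) =====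
theorem mul_poly_simple_spec : Claim_equal_mul_poly_simple := by
  intro a b f q hdom hpre
  obtain ⟨hq, hf, hab⟩ := hpre
  unfold Spec_mul_poly_simple
  rw [pv_portA_eq a b f q hf hab, pv_portB_eq a b f q hf]
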